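-- pv_equiv track=rewrite | github.com/SrEstroncio38/EjerciciosAJ | JuezEstudiar/Backtrack/BattleRoyal.py | EquiposBattleRoyal
-- ===== SOURCE A (Python) =====
-- def EquiposBattleRoyal(personaje, lvls, sol, mejorSol, equipos):
--     if personaje >= len(lvls):
--         sol = max(abs(equipos[0] - equipos[1]), abs(equipos[0] - equipos[2]), abs(equipos[1] - equipos[2]))
--         if sol <= mejorSol:
--             mejorSol = sol
--     else:
--         j = 0
--         while j < 3:
--             equipos[j] += lvls[personaje]
--             mejorSol = EquiposBattleRoyal(personaje + 1, lvls, sol, mejorSol, equipos)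
--             equipos[j] -= lvls[personaje]
--             j += 1
--
--     return mejorSol
-- ===== SOURCE B (Python) =====
-- def EquiposBattleRoyal(personaje, lvls, sol, mejorSol, equipos):
--     rest = lvls[personaje:]
--     e0, e1, e2 = equipos[0], equipos[1], equipos[2]
--     total = e0 + e1 + e2 + sum(rest)
--     pairs = {(e0, e1)}
--     for l in rest:
--         pairs = {q for (a, b) in pairs for q in ((a + l, b), (a, b + l), (a, b))}
--     best = mejorSol
--     for (a, b) in pairs:
--         c = total - a - b
--         m = max(abs(a - b), abs(a - c), abs(b - c))
--         if m < best:
--             best = m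
--     return best
-- ===== Notes on version B (the rewrite author's own statement) =====
-- stated objective: alternative
-- what changed: Replaces the O(3^n) recursive backtracking over all three-way assignments by an iterative DP over the set of reachable (team0,team1) partial-sum pairs (team2 is determined by the total), then minimizes the max pairwise difference over that set.
-- outside the precondition, e.g. on EquiposBattleRoyal(-1, [1, 2], 0, 100, [0, 0, 0]): A returns 1, B returns 2
import Mathlib
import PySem

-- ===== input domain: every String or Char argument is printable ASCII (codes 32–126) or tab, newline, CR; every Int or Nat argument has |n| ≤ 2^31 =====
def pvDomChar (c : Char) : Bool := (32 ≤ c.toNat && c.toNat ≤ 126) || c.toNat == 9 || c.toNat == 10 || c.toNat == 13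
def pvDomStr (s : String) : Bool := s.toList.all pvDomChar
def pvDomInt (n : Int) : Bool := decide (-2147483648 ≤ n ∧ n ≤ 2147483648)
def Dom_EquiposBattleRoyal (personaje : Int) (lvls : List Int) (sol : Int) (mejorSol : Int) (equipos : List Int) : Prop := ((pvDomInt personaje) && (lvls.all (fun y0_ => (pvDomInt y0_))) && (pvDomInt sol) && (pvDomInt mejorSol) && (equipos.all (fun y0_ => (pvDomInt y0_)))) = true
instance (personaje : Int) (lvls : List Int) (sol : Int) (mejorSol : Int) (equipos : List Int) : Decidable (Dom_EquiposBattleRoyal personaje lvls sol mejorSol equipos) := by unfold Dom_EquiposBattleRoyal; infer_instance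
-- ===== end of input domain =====

-- B replaces A's recursive backtracking over all 3-way assignments by an iterative DP over
-- the set of reachable (team0,team1) partial-sum pairs (team2 is determined by the total),
-- then takes the minimum max-pairwise-difference over that set; objective: alternative.
-- A mutates `equipos` in place during the search but restores it before returning; the
-- equivalence proved here is about the RETURN value only.

-- ===== PORT A =====
def EquiposBattleRoyal (personaje : Int) (lvls : List Int) (sol : Int) (mejorSol : Int) (equipos : List Int) : Int :=
  if _h : personaje ≥ (lvls.length : Int) then
    let sol := max (max |PySem.List.pyGetD equipos 0 0 - PySem.List.pyGetD equipos 1 0|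
                        |PySem.List.pyGetD equipos 0 0 - PySem.List.pyGetD equipos 2 0|)
                   |PySem.List.pyGetD equipos 1 0 - PySem.List.pyGetD equipos 2 0|
    if sol ≤ mejorSol then sol else mejorSol
  else
    -- while j < 3: equipos[j] += lvls[personaje]; recurse; equipos[j] -= lvls[personaje]
    (PySem.List.pyRange 0 3 1).foldl
      (fun mb j =>
        EquiposBattleRoyal (personaje + 1) lvls sol mb
          (PySem.List.pySetD equipos j (PySem.List.pyGetD equipos j 0 + PySem.List.pyGetD lvls personaje 0)))
      mejorSol
termination_by ((lvls.length : Int) - personaje).toNat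
decreasing_by omega

-- ===== PORT B =====
def EquiposBattleRoyal_alt (personaje : Int) (lvls : List Int) (sol : Int) (mejorSol : Int) (equipos : List Int) : Int :=
  let rest := PySem.List.slice lvls (some personaje) none
  let e0 := PySem.List.pyGetD equipos 0 0
  let e1 := PySem.List.pyGetD equipos 1 0
  let e2 := PySem.List.pyGetD equipos 2 0
  let total := e0 + e1 + e2 + rest.sum
  let pairs : PySem.Set (Int × Int) :=
    rest.foldl
      (fun P l => PySem.Set.ofList (P.flatMap (fun q => [(q.1 + l, q.2), (q.1, q.2 + l), (q.1, q.2)])))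
      (PySem.Set.ofList [(e0, e1)])
  pairs.foldl
    (fun best q =>
      let c := total - q.1 - q.2
      let m := max (max |q.1 - q.2| |q.1 - c|) |q.2 - c|
      if m < best then m else best)
    mejorSol

-- ===== PRECONDITION & SPEC =====
-- Pre_ restricts to the function's natural domain: `personaje` is a recursion index, so
-- 0 ≤ personaje, and `equipos` holds the three team sums, so 3 ≤ equipos.length.  On a
-- negative in-range `personaje` A still returns, but via negative-index wraparound it
-- re-processes the wrapped suffix and then the whole list again; for personaje < -len(lvls)
-- or fewer than three `equipos` entries A raises IndexError.
def Pre_EquiposBattleRoyal (personaje : Int) (lvls : List Int) (sol : Int) (mejorSol : Int) (equipos : List Int) : Prop :=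
  0 ≤ personaje ∧ 3 ≤ equipos.length
instance (personaje : Int) (lvls : List Int) (sol : Int) (mejorSol : Int) (equipos : List Int) : Decidable (Pre_EquiposBattleRoyal personaje lvls sol mejorSol equipos) := by unfold Pre_EquiposBattleRoyal; infer_instance

def pvWitness_EquiposBattleRoyal : Int × List Int × Int × Int × List Int := (0, [1, 2, 3], 0, 100, [0, 0, 0])

def Spec_EquiposBattleRoyal (personaje : Int) (lvls : List Int) (sol : Int) (mejorSol : Int) (equipos : List Int) (out : Int) : Prop := out = EquiposBattleRoyal_alt personaje lvls sol mejorSol equipos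
instance (personaje : Int) (lvls : List Int) (sol : Int) (mejorSol : Int) (equipos : List Int) (out : Int) : Decidable (Spec_EquiposBattleRoyal personaje lvls sol mejorSol equipos out) := by unfold Spec_EquiposBattleRoyal; infer_instance

-- ===== CLAIM (what is proved, stated in full; the proofs are below) =====
def Claim_equal_EquiposBattleRoyal : Prop := ∀ (personaje : Int) (lvls : List Int) (sol : Int) (mejorSol : Int) (equipos : List Int), Dom_EquiposBattleRoyal personaje lvls sol mejorSol equipos → Pre_EquiposBattleRoyal personaje lvls sol mejorSol equipos → Spec_EquiposBattleRoyal personaje lvls sol mejorSol equipos (EquiposBattleRoyal personaje lvls sol mejorSol equipos)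

-- ===== LEMMAS AND PROOFS =====

-- score of a triple of team sums
def pvS3 (a b c : Int) : Int := max (max |a - b| |a - c|) |b - c|

-- all triples of team sums reachable by distributing the levels `ls` over the three teams
def pvTriples : List Int → Int → Int → Int → List (Int × Int × Int)
  | [], a, b, c => [(a, b, c)]
  | l :: ls, a, b, c => pvTriples ls (a + l) b c ++ pvTriples ls a (b + l) c ++ pvTriples ls a b (c + l)

-- the (team0,team1) projections of those triples
def pvPairs : List Int → Int → Int → List (Int × Int)
  | [], a, b => [(a, b)]
  | l :: ls, a, b => pvPairs ls (a + l) b ++ pvPairs ls a (b + l) ++ pvPairs ls a b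

-- running minimum of f over xs, seeded with m
def pvMin {α : Type} (f : α → Int) (m : Int) (xs : List α) : Int :=
  xs.foldl (fun b x => min b (f x)) m

theorem pvMin_le_init {α : Type} (f : α → Int) (m : Int) (xs : List α) : pvMin f m xs ≤ m := by
  induction xs generalizing m with
  | nil => simp [pvMin]
  | cons x xs ih =>
    have := ih (min m (f x))
    simp only [pvMin, List.foldl_cons] at *
    omega

theorem pvMin_le_mem {α : Type} (f : α → Int) (m : Int) (xs : List α) {x : α} (hx : x ∈ xs) :
    pvMin f m xs ≤ f x := by
  induction xs generalizing m with
  | nil => cases hx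
  | cons y ys ih =>
    rcases List.mem_cons.mp hx with h | h
    · subst h
      have := pvMin_le_init f (min m (f x)) ys
      simp only [pvMin, List.foldl_cons] at *
      omega
    · simp only [pvMin, List.foldl_cons]
      exact ih (min m (f y)) h

theorem le_pvMin {α : Type} (f : α → Int) (m c : Int) (xs : List α)
    (hm : c ≤ m) (hx : ∀ x ∈ xs, c ≤ f x) : c ≤ pvMin f m xs := by
  induction xs generalizing m with
  | nil => simpa [pvMin] using hm
  | cons y ys ih =>
    simp only [pvMin, List.foldl_cons]
    exact ih (min m (f y)) (le_min hm (hx y (List.mem_cons_self))) (fun x h => hx x (List.mem_cons_of_mem _ h))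

theorem pvMin_congr {α β : Type} (f : α → Int) (g : β → Int) (m : Int) (xs : List α) (ys : List β)
    (h1 : ∀ x ∈ xs, ∃ y ∈ ys, g y = f x) (h2 : ∀ y ∈ ys, ∃ x ∈ xs, f x = g y) :
    pvMin f m xs = pvMin g m ys := by
  apply le_antisymm
  · apply le_pvMin
    · exact pvMin_le_init f m xs
    · intro y hy
      obtain ⟨x, hx, hfx⟩ := h2 y hy
      calc pvMin f m xs ≤ f x := pvMin_le_mem f m xs hx
        _ = g y := hfx
  · apply le_pvMin
    · exact pvMin_le_init g m ys
    · intro x hx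
      obtain ⟨y, hy, hgy⟩ := h1 x hx
      calc pvMin g m ys ≤ g y := pvMin_le_mem g m ys hy
        _ = f x := hgy

theorem pvMin_append {α : Type} (f : α → Int) (m : Int) (xs ys : List α) :
    pvMin f m (xs ++ ys) = pvMin f (pvMin f m xs) ys := by
  simp [pvMin, List.foldl_append]

-- A computes the seeded minimum of the triple scores
theorem A_eq_pvMin (lvls : List Int) (sol : Int) :
    ∀ (k : Nat) (p m a b c : Int) (r : List Int), 0 ≤ p → (((lvls.length : Int) - p).toNat = k) →
      EquiposBattleRoyal p lvls sol m (a :: b :: c :: r) =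
        pvMin (fun t => pvS3 t.1 t.2.1 t.2.2) m (pvTriples (lvls.drop p.toNat) a b c) := by
  intro k
  induction k with
  | zero =>
    intro p m a b c r hp hk
    have hlen : (lvls.length : Int) ≤ p := by omega
    have hdrop : lvls.drop p.toNat = [] := List.drop_of_length_le (by omega)
    rw [EquiposBattleRoyal, dif_pos hlen, hdrop]
    simp only [pvTriples, pvMin, List.foldl_cons, List.foldl_nil, pvS3]
    simp [pysem]
    omega
  | succ k ih =>
    intro p m a b c r hp hk
    have hplt : p < (lvls.length : Int) := by omega
    have hnat : p.toNat < lvls.length := by omega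
    have hdrop : lvls.drop p.toNat = lvls[p.toNat] :: lvls.drop (p.toNat + 1) :=
      List.drop_eq_getElem_cons hnat
    have hL : PySem.List.pyGetD lvls p 0 = lvls[p.toNat] :=
      PySem.List.pyGetD_eq_getElem lvls 0 hp (by omega)
    have hrange : PySem.List.pyRange 0 3 1 = [0, 1, 2] := by decide
    have hsucc : (p + 1).toNat = p.toNat + 1 := by omega
    have hk' : (((lvls.length : Int)) - (p + 1)).toNat = k := by omega
    rw [EquiposBattleRoyal, dif_neg (by omega), hrange]
    simp only [List.foldl_cons, List.foldl_nil]
    have hset0 : PySem.List.pySetD (a :: b :: c :: r) 0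
        (PySem.List.pyGetD (a :: b :: c :: r) 0 0 + PySem.List.pyGetD lvls p 0)
        = (a + lvls[p.toNat]) :: b :: c :: r := by
      simp [pysem, hL]
    have hset1 : PySem.List.pySetD (a :: b :: c :: r) 1
        (PySem.List.pyGetD (a :: b :: c :: r) 1 0 + PySem.List.pyGetD lvls p 0)
        = a :: (b + lvls[p.toNat]) :: c :: r := by
      simp [pysem, hL]
    have hset2 : PySem.List.pySetD (a :: b :: c :: r) 2
        (PySem.List.pyGetD (a :: b :: c :: r) 2 0 + PySem.List.pyGetD lvls p 0)
        = a :: b :: (c + lvls[p.toNat]) :: r := by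
      simp [pysem, hL]
    rw [hset0]
    rw [ih (p + 1) m (a + lvls[p.toNat]) b c r (by omega) hk']
    rw [hset1]
    rw [ih (p + 1) _ a (b + lvls[p.toNat]) c r (by omega) hk']
    rw [hset2]
    rw [ih (p + 1) _ a b (c + lvls[p.toNat]) r (by omega) hk']
    rw [hdrop, hsucc]
    simp only [pvTriples, pvMin_append]

-- pairs are the projections of triples
theorem pairs_eq_map_triples : ∀ (ls : List Int) (a b c : Int),
    (pvTriples ls a b c).map (fun t => (t.1, t.2.1)) = pvPairs ls a b := by
  intro ls
  induction ls with
  | nil => intro a b c; simp [pvTriples, pvPairs]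
  | cons l ls ih => intro a b c; simp [pvTriples, pvPairs, ih]

-- each reachable triple sums to start + sum of levels
theorem triples_sum : ∀ (ls : List Int) (a b c : Int) (t : Int × Int × Int),
    t ∈ pvTriples ls a b c → t.1 + t.2.1 + t.2.2 = a + b + c + ls.sum := by
  intro ls
  induction ls with
  | nil => intro a b c t ht; simp [pvTriples] at ht; subst ht; simp
  | cons l ls ih =>
    intro a b c t ht
    simp only [pvTriples, List.mem_append] at ht
    rcases ht with (h | h) | h
    · have := ih (a + l) b c t h; simp [List.sum_cons]; omega
    · have := ih a (b + l) c t h; simp [List.sum_cons]; omega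
    · have := ih a b (c + l) t h; simp [List.sum_cons]; omega

-- membership in B's iterated pair-set fold
theorem mem_pairsFold : ∀ (ls : List Int) (P : List (Int × Int)) (v : Int × Int),
    (v ∈ ls.foldl (fun P l => PySem.Set.ofList (P.flatMap (fun q => [(q.1 + l, q.2), (q.1, q.2 + l), (q.1, q.2)]))) P)
      ↔ ∃ q ∈ P, v ∈ pvPairs ls q.1 q.2 := by
  intro ls
  induction ls with
  | nil =>
    intro P v
    simp only [List.foldl_nil, pvPairs]
    constructor
    · intro h; exact ⟨v, h, by simp⟩
    · rintro ⟨q, hq, hv⟩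
      simp only [List.mem_cons, List.not_mem_nil, or_false] at hv
      subst hv; simpa using hq
  | cons l ls ih =>
    intro P v
    rw [List.foldl_cons, ih]
    constructor
    · rintro ⟨q, hq, hv⟩
      rw [PySem.Set.mem_ofList] at hq
      simp only [List.mem_flatMap] at hq
      obtain ⟨p, hp, hqp⟩ := hq
      refine ⟨p, hp, ?_⟩
      simp only [pvPairs, List.mem_append]
      simp only [List.mem_cons, List.not_mem_nil, or_false] at hqp
      rcases hqp with rfl | rfl | rfl
      · exact Or.inl (Or.inl hv)
      · exact Or.inl (Or.inr hv)
      · refine Or.inr ?_; simpa using hv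
    · rintro ⟨p, hp, hv⟩
      simp only [pvPairs, List.mem_append] at hv
      rcases hv with (h | h) | h
      · refine ⟨(p.1 + l, p.2), ?_, h⟩
        rw [PySem.Set.mem_ofList]
        exact List.mem_flatMap.mpr ⟨p, hp, by simp⟩
      · refine ⟨(p.1, p.2 + l), ?_, h⟩
        rw [PySem.Set.mem_ofList]
        exact List.mem_flatMap.mpr ⟨p, hp, by simp⟩
      · refine ⟨(p.1, p.2), ?_, by simpa using h⟩
        rw [PySem.Set.mem_ofList]
        exact List.mem_flatMap.mpr ⟨p, hp, by simp⟩

-- ===== VERDICT (by name: the statement is the Claim_ definition above) =====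
theorem foldl_if_lt_eq_pvMin (P : List (Int × Int)) (tot m : Int) :
    P.foldl (fun best q =>
      let c := tot - q.1 - q.2
      let mm := max (max |q.1 - q.2| |q.1 - c|) |q.2 - c|
      if mm < best then mm else best) m
    = pvMin (fun q => pvS3 q.1 q.2 (tot - q.1 - q.2)) m P := by
  unfold pvMin
  congr 1
  funext bst q
  simp only [pvS3]
  generalize max (max |q.1 - q.2| |q.1 - (tot - q.1 - q.2)|) |q.2 - (tot - q.1 - q.2)| = mm
  omega

theorem EquiposBattleRoyal_spec : Claim_equal_EquiposBattleRoyal := by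
  intro personaje lvls sol mejorSol equipos _hdom hpre
  obtain ⟨hp, hlen⟩ := hpre
  rcases equipos with _ | ⟨a, _ | ⟨b, _ | ⟨c, r⟩⟩⟩
  · simp at hlen
  · simp at hlen
  · simp at hlen
  unfold Spec_EquiposBattleRoyal
  rw [A_eq_pvMin lvls sol (((lvls.length : Int) - personaje).toNat) personaje mejorSol a b c r hp rfl]
  simp only [EquiposBattleRoyal_alt]
  rw [PySem.List.slice_from lvls hp]
  have hg0 : PySem.List.pyGetD (a :: b :: c :: r) 0 0 = a := by simp [pysem]
  have hg1 : PySem.List.pyGetD (a :: b :: c :: r) 1 0 = b := by simp [pysem]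
  have hg2 : PySem.List.pyGetD (a :: b :: c :: r) 2 0 = c := by simp [pysem]
  rw [hg0, hg1, hg2]
  rw [foldl_if_lt_eq_pvMin]
  apply pvMin_congr
  · -- every triple's score is realized by its pair in B's final set
    intro t ht
    refine ⟨(t.1, t.2.1), ?_, ?_⟩
    · rw [mem_pairsFold]
      refine ⟨(a, b), ?_, ?_⟩
      · rw [PySem.Set.mem_ofList]; simp
      · rw [← pairs_eq_map_triples (lvls.drop personaje.toNat) a b c]
        exact List.mem_map.mpr ⟨t, ht, rfl⟩
    · have hs := triples_sum (lvls.drop personaje.toNat) a b c t ht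
      have : a + b + c + (lvls.drop personaje.toNat).sum - t.1 - t.2.1 = t.2.2 := by omega
      rw [this]
  · -- every pair in B's final set comes from a reachable triple
    intro q hq
    rw [mem_pairsFold] at hq
    obtain ⟨p, hpmem, hq⟩ := hq
    rw [PySem.Set.mem_ofList] at hpmem
    simp only [List.mem_cons, List.not_mem_nil, or_false] at hpmem
    subst hpmem
    rw [← pairs_eq_map_triples (lvls.drop personaje.toNat) a b c] at hq
    obtain ⟨t, ht, hproj⟩ := List.mem_map.mp hq
    refine ⟨t, ht, ?_⟩
    have hs := triples_sum (lvls.drop personaje.toNat) a b c t ht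
    have h1 : q.1 = t.1 := by rw [← hproj]
    have h2 : q.2 = t.2.1 := by rw [← hproj]
    have : a + b + c + (lvls.drop personaje.toNat).sum - q.1 - q.2 = t.2.2 := by omega
    rw [this, h1, h2]
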